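-- pv_equiv track=rewrite | github.com/ra334/IP-range-generator | main.py | generate
-- ===== SOURCE A (Python) =====
-- def generate(ip):
--
--     ip_arr = []
--
--     num = ''
--
--     for i in ip:
--
--         if i == '.':
--             ip_arr.append(int(num))
--             num = ''
--         else:
--             num += i
--
--     return ip_arr
-- ===== SOURCE B (Python) =====
-- def generate(ip):
--     return [int(x) for x in ip.split('.')[:-1]]
-- ===== Notes on version B (the rewrite author's own statement) =====
-- stated objective: simpler
-- what changed: Replaced the character-by-character accumulator loop with a single split('.') followed by a map-to-int over all tokens except the last (the loop never flushes the final segment).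
import Mathlib
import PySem

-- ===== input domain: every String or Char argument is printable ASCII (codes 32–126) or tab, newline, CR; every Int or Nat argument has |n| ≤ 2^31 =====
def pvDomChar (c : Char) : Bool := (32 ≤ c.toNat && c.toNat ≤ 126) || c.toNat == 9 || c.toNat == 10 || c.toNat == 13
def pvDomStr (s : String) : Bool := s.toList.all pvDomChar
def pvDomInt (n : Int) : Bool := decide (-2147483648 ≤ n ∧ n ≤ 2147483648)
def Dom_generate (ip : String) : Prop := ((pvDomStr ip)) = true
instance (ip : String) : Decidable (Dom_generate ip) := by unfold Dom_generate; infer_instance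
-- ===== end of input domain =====

-- B replaces A's character-by-character accumulator loop with split('.') + map-to-int
-- over all tokens but the last (simpler decomposition; the loop never flushes the last segment).

-- ===== PORT A =====
-- per-character loop; state = (ip_arr, num); int(num) failing = ValueError, modelled as none
def generateGo : List Char → List Int → List Char → Option (List Int)
  | [], arr, _num => some arr
  | c :: rest, arr, num =>
    if c = '.' then
      match PySem.Int.ofChars? num with
      | none => none
      | some n => generateGo rest (arr ++ [n]) []
    else
      generateGo rest arr (num ++ [c])

def generate (ip : String) : List Int := (generateGo ip.toList [] []).getD []

-- ===== PORT B =====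
-- ip.split('.')[:-1] mapped through int; a failing int() (ValueError) is modelled as none
def generate_alt (ip : String) : List Int :=
  match PySem.Str.split? ip "." with
  | none => []  -- unreachable: the separator "." is nonempty
  | some parts => ((PySem.List.slice parts none (some (-1))).mapM PySem.Int.ofStr?).getD []

-- ===== PRECONDITION & SPEC =====
-- Pre_ excludes exactly the inputs where Python A raises ValueError: some '.'-terminated
-- segment of ip is not a valid int literal (B raises ValueError there too).
def Pre_generate (ip : String) : Prop :=
  ∀ s ∈ ((PySem.Str.split? ip ".").getD []).dropLast, (PySem.Int.ofStr? s).isSome = true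
instance (ip : String) : Decidable (Pre_generate ip) := by unfold Pre_generate; infer_instance
def pvWitness_generate : String := "1.2.3"

def Spec_generate (ip : String) (out : List Int) : Prop := out = generate_alt ip
instance (ip : String) (out : List Int) : Decidable (Spec_generate ip out) := by unfold Spec_generate; infer_instance

-- ===== CLAIM (what is proved, stated in full; the proofs are below) =====
def Claim_equal_generate : Prop := ∀ (ip : String), Dom_generate ip → Pre_generate ip → Spec_generate ip (generate ip)

-- ===== LEMMAS AND PROOFS =====

-- the '.'-separated segments of a char list, as a structural recursion (spec for splitOn)
def segs : List Char → List (List Char)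
  | [] => [[]]
  | c :: rest =>
    if c = '.' then [] :: segs rest
    else
      match segs rest with
      | [] => [[c]]
      | h :: t => (c :: h) :: t

lemma segs_ne_nil (l : List Char) : segs l ≠ [] := by
  cases l with
  | nil => simp [segs]
  | cons c rest =>
    simp only [segs]
    split
    · simp
    · split <;> simp

lemma splitOn_go_segs : ∀ (fuel : Nat) (l cur : List Char) (acc : List (List Char)),
    l.length < fuel →
    PySem.Chars.splitOn.go ['.'] fuel l cur acc
      = acc.reverse ++ (cur.reverse ++ (segs l).headI) :: (segs l).tail := by
  intro fuel
  induction fuel with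
  | zero => intro l cur acc h; omega
  | succ n ih =>
    intro l cur acc h
    cases l with
    | nil => simp [PySem.Chars.splitOn.go, segs]
    | cons c rest =>
      rw [PySem.Chars.splitOn.go]
      by_cases hc : c = '.'
      · have hp : List.isPrefixOf ['.'] (c :: rest) = true := by
          simp [List.isPrefixOf, hc]
        rw [if_pos hp]
        subst hc
        have := ih rest [] (cur.reverse :: acc) (by simpa using Nat.lt_of_succ_lt_succ h)
        simp only [List.length_cons, List.length_nil, List.drop_succ_cons, List.drop_zero]
        rw [this]
        obtain ⟨hh, ht, he⟩ : ∃ hh ht, segs rest = hh :: ht :=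
          match hseg : segs rest with
          | [] => absurd hseg (segs_ne_nil rest)
          | a :: b => ⟨a, b, rfl⟩
        simp [segs, he]
      · have hp : List.isPrefixOf ['.'] (c :: rest) = false := by
          simp [List.isPrefixOf]
          exact fun h' => (hc h'.symm).elim
        rw [if_neg (by simp [hp])]
        have := ih rest (c :: cur) acc (by simpa using Nat.lt_of_succ_lt_succ h)
        rw [this]
        obtain ⟨hh, ht, he⟩ : ∃ hh ht, segs rest = hh :: ht :=
          match hseg : segs rest with
          | [] => absurd hseg (segs_ne_nil rest)
          | a :: b => ⟨a, b, rfl⟩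
        simp [segs, hc, he]

lemma splitOn_eq_segs (l : List Char) : PySem.Chars.splitOn l ['.'] = segs l := by
  have := splitOn_go_segs (l.length + 1) l [] [] (by omega)
  rw [PySem.Chars.splitOn] at *
  simp only [this, List.reverse_nil, List.nil_append]
  obtain ⟨hh, ht, he⟩ : ∃ hh ht, segs l = hh :: ht :=
    match hseg : segs l with
    | [] => absurd hseg (segs_ne_nil l)
    | a :: b => ⟨a, b, rfl⟩
  simp [he]

lemma generateGo_eq (l : List Char) : ∀ (num : List Char) (arr : List Int),
    generateGo l arr num
      = (((num ++ (segs l).headI) :: (segs l).tail).dropLast.mapM PySem.Int.ofChars?).map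
          (fun xs => arr ++ xs) := by
  induction l with
  | nil => intro num arr; simp [generateGo, segs]
  | cons c rest ih =>
    intro num arr
    obtain ⟨hh, ht, he⟩ : ∃ hh ht, segs rest = hh :: ht :=
      match hseg : segs rest with
      | [] => absurd hseg (segs_ne_nil rest)
      | a :: b => ⟨a, b, rfl⟩
    by_cases hc : c = '.'
    · simp only [generateGo, segs, if_pos hc]
      cases hv : PySem.Int.ofChars? num with
      | none => simp [he, hv, List.mapM_cons]
      | some n =>
        show generateGo rest (arr ++ [n]) [] = _
        rw [ih [] (arr ++ [n])]
        simp only [he, List.nil_append, List.headI, List.tail]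
        simp only [List.dropLast, List.mapM_cons]
        cases hm : List.mapM PySem.Int.ofChars? ((hh :: ht).dropLast) with
        | none => cases ht <;> simp_all
        | some ys => cases ht <;> simp_all
    · simp only [generateGo, segs, if_neg hc, he]
      rw [ih (num ++ [c]) arr]
      simp [he]

lemma mapM_map_toList (l : List String) :
    (l.map String.toList).mapM PySem.Int.ofChars? = l.mapM PySem.Int.ofStr? := by
  induction l with
  | nil => simp
  | cons a t ih => simp [List.mapM_cons, ih, PySem.Int.ofStr?]

lemma generate_eq_core (ip : String) :
    generate ip = ((segs ip.toList).dropLast.mapM PySem.Int.ofChars?).getD [] := by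
  obtain ⟨hh, ht, he⟩ : ∃ hh ht, segs ip.toList = hh :: ht :=
    match hseg : segs ip.toList with
    | [] => absurd hseg (segs_ne_nil _)
    | a :: b => ⟨a, b, rfl⟩
  rw [generate, generateGo_eq ip.toList [] []]
  simp only [List.nil_append, he, List.headI, List.tail]
  cases List.mapM PySem.Int.ofChars? ((hh :: ht).dropLast) <;> simp

lemma generate_alt_eq_core (ip : String) :
    generate_alt ip = ((segs ip.toList).dropLast.mapM PySem.Int.ofChars?).getD [] := by
  have hkey := PySem.Str.split?_map ip "."
  rw [generate_alt]
  cases hs : PySem.Str.split? ip "." with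
  | none =>
    rw [hs] at hkey
    simp [PySem.Chars.split?] at hkey
  | some parts =>
    rw [hs] at hkey
    simp only [Option.map_some, PySem.Chars.split?] at hkey
    have hparts : parts.map String.toList = segs ip.toList := by
      have : (String.toList ".") = ['.'] := rfl
      simp_all [splitOn_eq_segs]
    show (List.mapM PySem.Int.ofStr? (PySem.List.slice parts none (some (-1)))).getD []
        = (List.mapM PySem.Int.ofChars? (segs ip.toList).dropLast).getD []
    rw [PySem.List.slice_to_neg_one, ← mapM_map_toList, List.map_dropLast, hparts]

-- ===== VERDICT (by name: the statement is the Claim_ definition above) =====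
theorem generate_spec : Claim_equal_generate := by
  intro ip _hdom _hpre
  unfold Spec_generate
  rw [generate_eq_core, generate_alt_eq_core]
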